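-- pv_equiv track=rewrite | github.com/Vishnu9535/largestrectangle | final.py | add_unique_numbers
-- ===== SOURCE A (Python) =====
-- def add_unique_numbers(matrix):
--     max_row_length = max(len(row) for row in matrix)
--     used_numbers = set()
--
--     for row in matrix:
--         while len(row) < max_row_length:
--             unique_number = find_unique_number(used_numbers, matrix)
--             row.append(unique_number)
--             used_numbers.add(unique_number)
--
--     return matrix
--
-- def find_unique_number(used_numbers, matrix):
--     number = 1
--     while number in used_numbers or any(number in row for row in matrix):
--         number += 1
--     return number
-- ===== SOURCE B (Python) =====
-- def add_unique_numbers(matrix):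
--     # Pads in place (same mutation as A); returns the matrix.
--     width = max(len(row) for row in matrix)
--     existing = {v for row in matrix for v in row}
--     counter = 1
--     for row in matrix:
--         for _ in range(width - len(row)):
--             while counter in existing:
--                 counter += 1
--             row.append(counter)
--             counter += 1
--     return matrix
-- ===== Notes on version B (the rewrite author's own statement) =====
-- stated objective: alternative
-- what changed: Instead of restarting from 1 and rescanning the used set plus the whole (growing) matrix for every padding cell, B builds the set of existing values once and advances a single forward counter over the unused positive integers; it trades a one-time full-matrix set build for the per-cell rescans.
import Mathlib
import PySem

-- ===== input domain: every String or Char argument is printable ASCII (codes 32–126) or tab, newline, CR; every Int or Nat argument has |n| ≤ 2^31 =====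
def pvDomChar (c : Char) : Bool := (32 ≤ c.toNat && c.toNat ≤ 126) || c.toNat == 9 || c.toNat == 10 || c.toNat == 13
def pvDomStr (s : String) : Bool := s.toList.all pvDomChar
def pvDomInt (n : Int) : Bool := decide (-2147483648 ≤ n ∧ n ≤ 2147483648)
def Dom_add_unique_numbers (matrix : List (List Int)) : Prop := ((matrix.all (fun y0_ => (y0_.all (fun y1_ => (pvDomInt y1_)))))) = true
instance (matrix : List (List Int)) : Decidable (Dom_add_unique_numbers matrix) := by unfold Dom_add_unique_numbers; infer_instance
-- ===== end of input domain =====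

-- B replaces A's per-cell rescans (restart at 1, scan the used set and the whole growing matrix)
-- with one precomputed set of existing values and a single forward counter; both pad rows in place
-- (same mutation) and the equivalence is about the returned matrix.

-- ===== PORT A =====
-- while number in used or any(number in row for row in matrix): number += 1
-- (fuel-based: bad.length + 1 candidate values always contain a free one)
def aScan (bad : List Int) : Nat → Int → Int
  | 0, n => n
  | f + 1, n => if n ∈ bad then aScan bad f (n + 1) else n

def find_unique_number (used : List Int) (matrix : List (List Int)) : Int :=
  let bad := used ++ matrix.flatten
  aScan bad (bad.length + 1) 1

-- while len(row) < max_row_length: append find_unique_number(used, matrix); used.add(it)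
-- (each iteration appends one element, so the loop runs width - len(row) times)
def aPad (donerev rest : List (List Int)) : Nat → List Int → PySem.Set Int → List Int × PySem.Set Int
  | 0, row, used => (row, used)
  | k + 1, row, used =>
    let u := find_unique_number used (donerev.reverse ++ row :: rest)
    aPad donerev rest k (row ++ [u]) (PySem.Set.add used u)

-- for row in matrix: … ; donerev holds the already-processed (padded) rows, reversed
def aLoop (width : Nat) : List (List Int) → List (List Int) → PySem.Set Int → List (List Int)
  | donerev, [], _ => donerev.reverse
  | donerev, row :: rest, used =>
    let ru := aPad donerev rest (width - row.length) row used
    aLoop width (ru.1 :: donerev) rest ru.2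

def add_unique_numbers (matrix : List (List Int)) : List (List Int) :=
  match (matrix.map List.length).max? with
  | none => []   -- Python raises ValueError on max() of an empty matrix; excluded by Pre_
  | some width => aLoop width [] matrix PySem.Set.empty

-- ===== PORT B =====
-- while counter in existing: counter += 1 (fuel-based, existing.length + 1 candidates suffice)
def bScan (existing : List Int) : Nat → Int → Int
  | 0, c => c
  | f + 1, c => if c ∈ existing then bScan existing f (c + 1) else c

-- for _ in range(width - len(row)): skip used values, append counter, counter += 1
def bRow (existing : List Int) : Nat → Int → List Int × Int
  | 0, c => ([], c)
  | k + 1, c =>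
    let c1 := bScan existing (existing.length + 1) c
    let pc := bRow existing k (c1 + 1)
    (c1 :: pc.1, pc.2)

def bLoop (existing : List Int) (width : Nat) : List (List Int) → Int → List (List Int)
  | [], _ => []
  | row :: rest, c =>
    let pc := bRow existing (width - row.length) c
    (row ++ pc.1) :: bLoop existing width rest pc.2

def add_unique_numbers_alt (matrix : List (List Int)) : List (List Int) :=
  match (matrix.map List.length).max? with
  | none => []   -- same max() call as A; raises in Python, excluded by Pre_
  | some width => bLoop (PySem.Set.ofList matrix.flatten) width matrix 1

-- ===== PRECONDITION & SPEC =====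
-- Pre_ excludes only the empty matrix, on which Python's max() raises ValueError in both A and B.
def Pre_add_unique_numbers (matrix : List (List Int)) : Prop := matrix ≠ []
instance (matrix : List (List Int)) : Decidable (Pre_add_unique_numbers matrix) := by unfold Pre_add_unique_numbers; infer_instance
def pvWitness_add_unique_numbers : List (List Int) := [[3, 1], [7]]

def Spec_add_unique_numbers (matrix : List (List Int)) (out : List (List Int)) : Prop := out = add_unique_numbers_alt matrix
instance (matrix : List (List Int)) (out : List (List Int)) : Decidable (Spec_add_unique_numbers matrix out) := by unfold Spec_add_unique_numbers; infer_instance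

-- ===== CLAIM (what is proved, stated in full; the proofs are below) =====
def Claim_equal_add_unique_numbers : Prop := ∀ (matrix : List (List Int)), Dom_add_unique_numbers matrix → Pre_add_unique_numbers matrix → Spec_add_unique_numbers matrix (add_unique_numbers matrix)

-- ===== LEMMAS AND PROOFS =====

-- aScan with enough fuel returns the least value ≥ n outside `bad`.
theorem aScan_spec (bad : List Int) : ∀ (f : Nat) (n : Int),
    (bad.toFinset.filter (fun x => n ≤ x)).card < f →
    n ≤ aScan bad f n ∧ aScan bad f n ∉ bad ∧
      ∀ m, n ≤ m → m < aScan bad f n → m ∈ bad := by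
  intro f
  induction f with
  | zero => intro n h; omega
  | succ f ih =>
    intro n h
    by_cases hn : n ∈ bad
    · have hmem : n ∈ bad.toFinset.filter (fun x => n ≤ x) := by
        simp [hn]
      have hers : (bad.toFinset.filter (fun x => (n + 1 : Int) ≤ x)) =
          (bad.toFinset.filter (fun x => n ≤ x)).erase n := by
        ext x
        simp only [Finset.mem_filter, Finset.mem_erase, List.mem_toFinset]
        constructor
        · intro ⟨hx, hle⟩; exact ⟨by omega, hx, by omega⟩
        · intro ⟨hne, hx, hle⟩; exact ⟨hx, by omega⟩
      have hcard : (bad.toFinset.filter (fun x => (n + 1 : Int) ≤ x)).card < f := by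
        rw [hers, Finset.card_erase_of_mem hmem]
        have := Finset.card_pos.mpr ⟨n, hmem⟩
        omega
      obtain ⟨h1, h2, h3⟩ := ih (n + 1) hcard
      refine ⟨?_, ?_, ?_⟩
      · simp [aScan, hn]; omega
      · simp only [aScan, if_pos hn]; exact h2
      · intro m hm1 hm2
        simp only [aScan, if_pos hn] at hm2
        rcases eq_or_lt_of_le hm1 with he | hlt
        · exact he ▸ hn
        · exact h3 m (by omega) hm2
    · simp only [aScan, if_neg hn]
      exact ⟨le_refl n, hn, fun m h1 h2 => absurd h1 (by omega)⟩

theorem bScan_eq_aScan (e : List Int) : ∀ f c, bScan e f c = aScan e f c := by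
  intro f
  induction f with
  | zero => intro c; rfl
  | succ f ih => intro c; simp only [bScan, aScan, ih]

theorem fuel_ok (bad : List Int) (n : Int) :
    (bad.toFinset.filter (fun x => n ≤ x)).card < bad.length + 1 := by
  have h1 : (bad.toFinset.filter (fun x => n ≤ x)).card ≤ bad.toFinset.card :=
    Finset.card_filter_le _ _
  have h2 := bad.toFinset_card_le
  omega

-- One row: A's padding of `row` produces row ++ pad where pad is B's fresh run, with invariants.
theorem row_eq (EL : List Int) (donerev rest : List (List Int)) :
    ∀ (k : Nat) (row used : List Int) (c : Int),
    (∀ x : Int, (x ∈ donerev.flatten ∨ x ∈ row ∨ x ∈ rest.flatten) ↔ (x ∈ EL ∨ x ∈ used)) →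
    (∀ s ∈ used, s < c ∧ s ∉ EL) →
    (∀ m : Int, 1 ≤ m → m < c → (m ∈ EL ∨ m ∈ used)) →
    1 ≤ c →
    (aPad donerev rest k row used).1 = row ++ (bRow EL k c).1 ∧
    (∀ x, x ∈ (aPad donerev rest k row used).2 ↔ x ∈ used ∨ x ∈ (bRow EL k c).1) ∧
    (∀ x : Int, (x ∈ donerev.flatten ∨ x ∈ (aPad donerev rest k row used).1 ∨ x ∈ rest.flatten)
        ↔ (x ∈ EL ∨ x ∈ (aPad donerev rest k row used).2)) ∧
    (∀ s ∈ (aPad donerev rest k row used).2, s < (bRow EL k c).2 ∧ s ∉ EL) ∧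
    (∀ m : Int, 1 ≤ m → m < (bRow EL k c).2 → (m ∈ EL ∨ m ∈ (aPad donerev rest k row used).2)) ∧
    1 ≤ (bRow EL k c).2 := by
  intro k
  induction k with
  | zero =>
    intro row used c h1 h2 h3 h4
    refine ⟨by simp [aPad, bRow], ?_, ?_, ?_, ?_, h4⟩
    · intro x; simp [aPad, bRow]
    · intro x; simpa [aPad] using h1 x
    · intro s hs; simpa [aPad, bRow] using h2 s hs
    · intro m hm1 hm2; simpa [aPad, bRow] using h3 m hm1 hm2
  | succ k ih =>
    intro row used c h1 h2 h3 h4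
    -- A's chosen number
    set cur := donerev.reverse ++ row :: rest with hcur
    set bad := used ++ cur.flatten with hbad
    have hbadmem : ∀ x : Int, x ∈ bad ↔ (x ∈ EL ∨ x ∈ used) := by
      intro x
      have : x ∈ cur.flatten ↔ (x ∈ donerev.flatten ∨ x ∈ row ∨ x ∈ rest.flatten) := by
        simp only [hcur, List.flatten_append, List.mem_append, List.flatten_cons]
        constructor
        · rintro (h | h | h)
          · left; rw [List.mem_flatten] at h ⊢
            obtain ⟨l, hl, hx⟩ := h; exact ⟨l, List.mem_reverse.mp hl, hx⟩
          · right; left; exact h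
          · right; right; exact h
        · rintro (h | h | h)
          · left; rw [List.mem_flatten] at h ⊢
            obtain ⟨l, hl, hx⟩ := h; exact ⟨l, List.mem_reverse.mpr hl, hx⟩
          · right; left; exact h
          · right; right; exact h
      rw [hbad, List.mem_append, this, h1 x]
      tauto
    have hu := aScan_spec bad (bad.length + 1) 1 (fuel_ok bad 1)
    set u := aScan bad (bad.length + 1) 1 with hudef
    obtain ⟨hu1, hu2, hu3⟩ := hu
    -- B's chosen number
    have hc := aScan_spec EL (EL.length + 1) c (fuel_ok EL c)
    set c1 := aScan EL (EL.length + 1) c with hc1def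
    obtain ⟨hc1, hc2, hc3⟩ := hc
    have hc1used : c1 ∉ used := fun h => absurd (h2 c1 h).1 (by omega)
    -- u = c1
    have huc : u = c1 := by
      have hle1 : u ≤ c1 := by
        by_contra hlt
        have : c1 ∈ bad := hu3 c1 (by omega) (by omega)
        rw [hbadmem] at this
        tauto
      have hge : c ≤ u := by
        by_contra hlt
        have := h3 u hu1 (by omega)
        rw [← hbadmem] at this
        exact hu2 this
      have hle2 : c1 ≤ u := by
        by_contra hlt
        have : u ∈ EL := hc3 u hge (by omega)
        exact hu2 ((hbadmem u).mpr (Or.inl this))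
      omega
    have huused : u ∉ used := huc ▸ hc1used
    have hadd : PySem.Set.add used u = used ++ [u] := PySem.Set.add_of_not_mem huused
    -- unfold one step of both sides
    have hA : aPad donerev rest (k + 1) row used
        = aPad donerev rest k (row ++ [u]) (used ++ [u]) := by
      simp only [aPad, find_unique_number]
      rw [← hbad, ← hudef, hadd]
    have hB1 : (bRow EL (k + 1) c).1 = c1 :: (bRow EL k (c1 + 1)).1 := by
      simp only [bRow, bScan_eq_aScan, ← hc1def]
    have hB2 : (bRow EL (k + 1) c).2 = (bRow EL k (c1 + 1)).2 := by
      simp only [bRow, bScan_eq_aScan, ← hc1def]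
    have huEL : u ∉ EL := huc ▸ hc2
    -- invariants for the recursive call
    have ih' := ih (row ++ [u]) (used ++ [u]) (c1 + 1)
      (by
        intro x
        simp only [List.mem_append, List.mem_singleton]
        constructor
        · rintro (h | (h | h) | h)
          · rcases (h1 x).mp (Or.inl h) with h' | h' <;> tauto
          · rcases (h1 x).mp (Or.inr (Or.inl h)) with h' | h' <;> tauto
          · tauto
          · rcases (h1 x).mp (Or.inr (Or.inr h)) with h' | h' <;> tauto
        · rintro (h | h | h)
          · rcases (h1 x).mpr (Or.inl h) with h' | h' | h' <;> tauto
          · rcases (h1 x).mpr (Or.inr h) with h' | h' | h' <;> tauto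
          · tauto)
      (by
        intro s hs
        rcases List.mem_append.mp hs with h | h
        · exact ⟨by have := (h2 s h).1; omega, (h2 s h).2⟩
        · simp only [List.mem_singleton] at h
          subst h; exact ⟨by omega, huEL⟩)
      (by
        intro m hm1 hm2
        by_cases hmc : m < c
        · rcases h3 m hm1 hmc with h | h
          · exact Or.inl h
          · exact Or.inr (List.mem_append.mpr (Or.inl h))
        · by_cases hmc1 : m < c1
          · exact Or.inl (hc3 m (by omega) hmc1)
          · have : m = c1 := by omega
            subst this
            exact Or.inr (by simp [huc]))
      (by omega)
    obtain ⟨ih1, ih2, ih3, ih4, ih5, ih6⟩ := ih'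
    rw [hA, hB1, hB2]
    refine ⟨?_, ?_, ih3, ih4, ih5, ih6⟩
    · rw [ih1, huc]; simp
    · intro x
      rw [ih2 x, huc]
      simp only [List.mem_append, List.mem_cons]
      tauto

-- Whole loop: A's stateful traversal equals the already-done prefix ++ B's loop.
theorem main_loop (EL : List Int) (width : Nat) :
    ∀ (rows : List (List Int)) (donerev : List (List Int)) (used : List Int) (c : Int),
    (∀ x : Int, (x ∈ donerev.flatten ∨ x ∈ rows.flatten) ↔ (x ∈ EL ∨ x ∈ used)) →
    (∀ s ∈ used, s < c ∧ s ∉ EL) →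
    (∀ m : Int, 1 ≤ m → m < c → (m ∈ EL ∨ m ∈ used)) →
    1 ≤ c →
    aLoop width donerev rows used = donerev.reverse ++ bLoop EL width rows c := by
  intro rows
  induction rows with
  | nil => intro donerev used c _ _ _ _; simp [aLoop, bLoop]
  | cons row rest ih =>
    intro donerev used c h1 h2 h3 h4
    have h1' : ∀ x : Int, (x ∈ donerev.flatten ∨ x ∈ row ∨ x ∈ rest.flatten) ↔ (x ∈ EL ∨ x ∈ used) := by
      intro x
      rw [← h1 x]
      simp only [List.flatten_cons, List.mem_append]
      try tauto
    obtain ⟨r1, r2, r3, r4, r5, r6⟩ :=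
      row_eq EL donerev rest (width - row.length) row used c h1' h2 h3 h4
    show aLoop width donerev (row :: rest) used = _
    simp only [aLoop, bLoop]
    rw [ih ((aPad donerev rest (width - row.length) row used).1 :: donerev)
        (aPad donerev rest (width - row.length) row used).2
        (bRow EL (width - row.length) c).2
        (by
          intro x
          rw [← r3 x]
          simp only [List.flatten_cons, List.mem_append]
          try tauto)
        r4 r5 r6]
    rw [r1]
    simp

-- ===== VERDICT (by name: the statement is the Claim_ definition above) =====
theorem add_unique_numbers_spec : Claim_equal_add_unique_numbers := by
  intro matrix _ hpre
  unfold Spec_add_unique_numbers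
  unfold add_unique_numbers add_unique_numbers_alt
  cases hmax : (matrix.map List.length).max? with
  | none => rfl
  | some width =>
    simp only
    rw [main_loop (PySem.Set.ofList matrix.flatten) width matrix [] PySem.Set.empty 1
      (by
        intro x
        simp [PySem.Set.mem_ofList, PySem.Set.empty])
      (by intro s hs; simp [PySem.Set.empty] at hs)
      (by intro m hm1 hm2; omega)
      (by omega)]
    simp
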